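-- pv_equiv track=rewrite | github.com/Jayesh-JainX/Speed-Typing-Test | Speed Typing Test.py | error_check
-- ===== SOURCE A (Python) =====
-- def error_check(l, s):
--     o = 0
--     for i in range(max(len(l), len(s))):
--         try:
--             if(l[i] != s[i]):
--                 o += 1
--         except:
--             o += 1
--     return o
-- ===== SOURCE B (Python) =====
-- def error_check(l, s):
--     return sum(1 for a, b in zip(l, s) if a != b) + abs(len(l) - len(s))
-- ===== Notes on version B (the rewrite author's own statement) =====
-- stated objective: simpler
-- what changed: Replaces the exception-guarded loop over range(max(len)) with a zip over the overlapping prefix plus a closed-form abs(length difference) for the tail, eliminating the try/except.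
import Mathlib
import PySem

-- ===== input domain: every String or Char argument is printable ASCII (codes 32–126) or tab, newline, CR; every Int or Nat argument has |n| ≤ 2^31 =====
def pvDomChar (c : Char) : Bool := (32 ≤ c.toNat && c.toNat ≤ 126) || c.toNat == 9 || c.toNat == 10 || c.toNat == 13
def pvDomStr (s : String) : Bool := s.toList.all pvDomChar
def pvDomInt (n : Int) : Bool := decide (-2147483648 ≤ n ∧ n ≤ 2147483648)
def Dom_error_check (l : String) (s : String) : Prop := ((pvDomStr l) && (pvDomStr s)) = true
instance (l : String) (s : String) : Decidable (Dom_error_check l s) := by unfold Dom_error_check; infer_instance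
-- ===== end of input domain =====

-- B replaces A's exception-guarded loop over range(max(len)) with a zip over the
-- overlapping prefix plus a closed-form |len(l) - len(s)| term for the tail (simpler).


-- ===== PORT A =====
-- the body of A's for-loop: l[i] or s[i] raising IndexError (pyGet? = none) is
-- caught by the bare 'except', which increments o, exactly like an unequal pair
def pvStepA (L S : List Char) (o : Int) (i : Int) : Int :=
  match PySem.List.pyGet? L i, PySem.List.pyGet? S i with
  | some a, some b => if a ≠ b then o + 1 else o
  | _, _ => o + 1

def error_check (l : String) (s : String) : Int :=
  (PySem.List.pyRange 0 (max (l.toList.length : Int) (s.toList.length : Int)) 1).foldl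
    (pvStepA l.toList s.toList) 0

-- ===== PORT B =====
def error_check_alt (l : String) (s : String) : Int :=
  ((l.toList.zip s.toList).foldl (fun n p => if p.1 ≠ p.2 then n + 1 else n) 0)
  + |((l.toList.length : Int) - (s.toList.length : Int))|

-- ===== PRECONDITION & SPEC =====
def Spec_error_check (l : String) (s : String) (out : Int) : Prop := out = error_check_alt l s
instance (l : String) (s : String) (out : Int) : Decidable (Spec_error_check l s out) := by unfold Spec_error_check; infer_instance

-- ===== CLAIM (what is proved, stated in full; the proofs are below) =====
def Claim_equal_error_check : Prop := ∀ (l : String) (s : String), Dom_error_check l s → Spec_error_check l s (error_check l s)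

-- ===== LEMMAS AND PROOFS =====

-- pulling the accumulator out of a foldl whose step is 'add something depending only on the element'
theorem pv_foldl_shiftacc {β : Type} (f : Int → β → Int) (hf : ∀ c i, f c i = c + f 0 i) :
    ∀ (r : List β) (c : Int), r.foldl f c = c + r.foldl f 0 := by
  intro r
  induction r with
  | nil => intro c; simp
  | cons i r ih =>
    intro c
    simp only [List.foldl_cons]
    rw [ih (f c i), ih (f 0 i), hf c i]
    ring

theorem pvStepA_shiftacc (L S : List Char) (c i : Int) :
    pvStepA L S c i = c + pvStepA L S 0 i := by
  unfold pvStepA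
  rcases PySem.List.pyGet? L i with _ | a <;> rcases PySem.List.pyGet? S i with _ | b <;>
    simp <;> split <;> omega

theorem pv_pyGet?_succ_tail (L : List Char) (k : Nat) :
    PySem.List.pyGet? L ((k : Int) + 1) = PySem.List.pyGet? L.tail (k : Int) := by
  cases L with
  | nil => simp [PySem.List.pyGet?, PySem.List.pyIdx?]
  | cons c T => simpa using PySem.List.pyGet?_cons_succ (xs := T) (x := c) (n := k)

-- shifting the index range down by one turns A's step on (L, S) into A's step on the tails
theorem pv_foldA_shift (L S : List Char) (M : Int) (c : Int) :
    (PySem.List.pyRange 1 (M + 1) 1).foldl (pvStepA L S) c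
      = (PySem.List.pyRange 0 M 1).foldl (pvStepA L.tail S.tail) c := by
  rw [PySem.List.pyRange_one 1 (M + 1), PySem.List.pyRange_one 0 M]
  have h1 : (M + 1 - 1) = M := by ring
  have h2 : (M - 0) = M := by ring
  rw [h1, h2]
  rw [List.foldl_map, List.foldl_map]
  congr 1
  funext o k
  show pvStepA L S o (1 + (k : Int)) = pvStepA L.tail S.tail o (0 + (k : Int))
  have e1 : (1 : Int) + (k : Int) = (k : Int) + 1 := by ring
  have e2 : (0 : Int) + (k : Int) = (k : Int) := by ring
  rw [e1, e2]
  unfold pvStepA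
  rw [pv_pyGet?_succ_tail L k, pv_pyGet?_succ_tail S k]

def pvZipStep (n : Int) (p : Char × Char) : Int := if p.1 ≠ p.2 then n + 1 else n

theorem pvZipStep_shiftacc (c : Int) (p : Char × Char) :
    pvZipStep c p = c + pvZipStep 0 p := by
  unfold pvZipStep; split <;> omega

-- the core equivalence, on the underlying character lists
theorem pv_main : ∀ (n : ℕ) (L S : List Char), L.length + S.length = n →
    (PySem.List.pyRange 0 (max (L.length : Int) (S.length : Int)) 1).foldl (pvStepA L S) 0
      = (L.zip S).foldl pvZipStep 0 + |((L.length : Int) - (S.length : Int))| := by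
  intro n
  induction n using Nat.strong_induction_on with
  | _ n ih =>
    intro L S hn
    by_cases hLS : L = [] ∧ S = []
    · rcases hLS with ⟨hL, hS⟩; subst hL; subst hS; decide
    · -- at least one list is nonempty; max length = max tail-lengths + 1
      have hM : max (L.length : Int) (S.length : Int)
          = max ((L.tail.length : Int)) ((S.tail.length : Int)) + 1 := by
        cases L <;> cases S <;> simp_all <;> omega
      set M : Int := max ((L.tail.length : Int)) ((S.tail.length : Int)) with hMdef
      have hM0 : (0 : Int) < M + 1 := by
        have : (0:Int) ≤ M := le_max_of_le_left (by positivity)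
        omega
      rw [hM, PySem.List.pyRange_one_cons hM0, List.foldl_cons,
        show (0 : Int) + 1 = 1 from by ring]
      rw [pv_foldl_shiftacc _ (pvStepA_shiftacc L S), pv_foldA_shift]
      have htails : L.tail.length + S.tail.length < n := by
        cases L <;> cases S <;> simp_all <;> omega
      rw [ih _ htails L.tail S.tail rfl]
      -- now compare head contributions, by cases on the shapes of L and S
      cases L with
      | nil =>
        cases S with
        | nil => exact absurd ⟨rfl, rfl⟩ hLS
        | cons b S' =>
          have hst : pvStepA [] (b :: S') 0 0 = 1 := by
            simp [pvStepA, PySem.List.pyGet?, PySem.List.pyIdx?]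
          rw [hst]
          simp only [List.zip_nil_left, List.tail_cons, List.tail_nil, List.foldl_nil,
            List.length_nil, List.length_cons]
          have hpos : (0 : Int) ≤ (S'.length : Int) := by positivity
          push_cast
          rw [zero_sub, zero_sub, abs_neg, abs_neg, abs_of_nonneg hpos,
            abs_of_nonneg (by omega : (0 : Int) ≤ (S'.length : Int) + 1)]
          ring
      | cons a L' =>
        cases S with
        | nil =>
          have hst : pvStepA (a :: L') [] 0 0 = 1 := by
            simp [pvStepA, PySem.List.pyGet?, PySem.List.pyIdx?]
          rw [hst]
          simp only [List.zip_nil_right, List.tail_cons, List.tail_nil, List.foldl_nil,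
            List.length_nil, List.length_cons]
          have hpos : (0 : Int) ≤ (L'.length : Int) := by positivity
          push_cast
          rw [sub_zero, sub_zero, abs_of_nonneg hpos,
            abs_of_nonneg (by omega : (0 : Int) ≤ (L'.length : Int) + 1)]
          ring
        | cons b S' =>
          have hga : PySem.List.pyGet? (a :: L') 0 = some a := PySem.List.pyGet?_zero_cons a L'
          have hgb : PySem.List.pyGet? (b :: S') 0 = some b := PySem.List.pyGet?_zero_cons b S'
          simp only [pvStepA, hga, hgb, List.zip_cons_cons, List.tail_cons, List.foldl_cons,
            List.length_cons]
          rw [pv_foldl_shiftacc _ pvZipStep_shiftacc (L'.zip S') (pvZipStep 0 (a, b))]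
          have habs : ((L'.length : Int) + 1) - ((S'.length : Int) + 1)
              = (L'.length : Int) - (S'.length : Int) := by ring
          push_cast
          rw [habs]
          show (if a ≠ b then (0:Int) + 1 else 0) + _ = _
          unfold pvZipStep
          split <;> ring

-- ===== VERDICT (by name: the statement is the Claim_ definition above) =====
theorem error_check_spec : Claim_equal_error_check := by
  intro l s _
  unfold Spec_error_check error_check error_check_alt
  rw [pv_main (l.toList.length + s.toList.length) l.toList s.toList rfl]
  rfl
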